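-- pv_equiv track=rewrite | github.com/LAPUS12l/Language | value_maker.py | out_put_natural
-- ===== SOURCE A (Python) =====
-- def out_put_natural(string):
-- 	out_put = ""
-- 	while string != "":
-- 		if string[0:4] == "True":
-- 			out_put += "TRUE"
-- 			string = string.replace("True", "", 1)
-- 		elif string[0:5] == "False":
-- 			out_put += "FALSE"
-- 			string = string.replace("False", "", 1)
-- 		elif string[0:4] == "None":
-- 			out_put += "NULL"
-- 			string = string.replace("None", "", 1)
-- 		else:
-- 			out_put += string[0]
-- 			string = string.replace(string[0], "", 1)
--
-- 	return out_put
-- ===== SOURCE B (Python) =====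
-- def out_put_natural(string):
--     return (string.replace("True", "TRUE")
--                   .replace("False", "FALSE")
--                   .replace("None", "NULL"))
-- ===== Notes on version B (the rewrite author's own statement) =====
-- stated objective: faster
-- what changed: A's hand-advanced while-loop that tests each leading token and rebuilds the whole remaining string with a count-1 replace at every step is replaced by three whole-string str.replace calls, valid because the tokens start with distinct letters and no replacement text contains or creates another token.
import Mathlib
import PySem

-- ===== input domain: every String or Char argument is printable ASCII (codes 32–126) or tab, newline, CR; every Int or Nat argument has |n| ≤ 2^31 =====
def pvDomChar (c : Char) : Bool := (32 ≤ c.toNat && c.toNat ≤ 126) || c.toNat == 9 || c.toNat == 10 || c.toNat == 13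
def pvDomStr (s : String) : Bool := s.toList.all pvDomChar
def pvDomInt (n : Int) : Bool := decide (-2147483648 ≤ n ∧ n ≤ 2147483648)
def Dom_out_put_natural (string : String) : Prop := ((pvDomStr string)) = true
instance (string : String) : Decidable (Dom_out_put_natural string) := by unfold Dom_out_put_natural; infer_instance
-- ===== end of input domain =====

-- B replaces A's hand-advanced while-loop scanner by three whole-string str.replace calls
-- (the three tokens start with distinct letters and no replacement creates a new token),
-- which is shorter and idiomatic.

-- ===== PORT A =====

-- Hand port of CPython `s.replace(old, new, 1)` (count = 1: at most the FIRST occurrence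
-- is replaced, scanning left to right; exact, including old = "" where Python prepends new).
def pyReplaceOnceGo (old new : List Char) : List Char → List Char
  | [] => []
  | c :: t =>
    if old.isPrefixOf (c :: t) then new ++ t.drop (old.length - 1)
    else c :: pyReplaceOnceGo old new t

def pyReplaceOnce (s old new : List Char) : List Char :=
  if old = [] then new ++ s else pyReplaceOnceGo old new s

-- the next three lemmas are needed by aLoopA's termination proof, hence sit above the port
theorem pyReplaceOnce_of_prefix (s old : List Char) (hold : old ≠ [])
    (h : old.isPrefixOf s = true) : pyReplaceOnce s old [] = s.drop old.length := by
  cases s with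
  | nil =>
    cases old with
    | nil => exact absurd rfl hold
    | cons a o => simp [List.isPrefixOf] at h
  | cons c t =>
    cases old with
    | nil => exact absurd rfl hold
    | cons a o => simp [pyReplaceOnce, pyReplaceOnceGo, h]

theorem slice4_iff (s w : List Char) (hw : w.length = 4) :
    (PySem.Chars.slice s (some 0) (some 4) = w) ↔ w <+: s := by
  have h4 : PySem.Chars.slice s (some 0) (some 4) = s.take 4 := by
    simp [PySem.List.slice]
  rw [h4, List.prefix_iff_eq_take, hw]
  exact eq_comm

theorem slice5_iff (s w : List Char) (hw : w.length = 5) :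
    (PySem.Chars.slice s (some 0) (some 5) = w) ↔ w <+: s := by
  have h5 : PySem.Chars.slice s (some 0) (some 5) = s.take 5 := by
    simp [PySem.List.slice]
  rw [h5, List.prefix_iff_eq_take, hw]
  exact eq_comm

-- the while-loop of A: each branch tests a leading token via a slice, emits the
-- replacement (resp. the first character) and removes it with replace(·, "", 1)
def aLoopA : List Char → List Char
  | [] => []
  | c :: t =>
    if h1 : PySem.Chars.slice (c :: t) (some 0) (some 4) = "True".toList then
      "TRUE".toList ++ aLoopA (pyReplaceOnce (c :: t) "True".toList [])
    else if h2 : PySem.Chars.slice (c :: t) (some 0) (some 5) = "False".toList then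
      "FALSE".toList ++ aLoopA (pyReplaceOnce (c :: t) "False".toList [])
    else if h3 : PySem.Chars.slice (c :: t) (some 0) (some 4) = "None".toList then
      "NULL".toList ++ aLoopA (pyReplaceOnce (c :: t) "None".toList [])
    else
      c :: aLoopA (pyReplaceOnce (c :: t) [c] [])
  termination_by l => l.length
  decreasing_by
  · rw [pyReplaceOnce_of_prefix _ _ (by decide)
      (List.isPrefixOf_iff_prefix.mpr ((slice4_iff _ _ (by decide)).mp h1))]
    simp
  · rw [pyReplaceOnce_of_prefix _ _ (by decide)
      (List.isPrefixOf_iff_prefix.mpr ((slice5_iff _ _ (by decide)).mp h2))]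
    simp
  · rw [pyReplaceOnce_of_prefix _ _ (by decide)
      (List.isPrefixOf_iff_prefix.mpr ((slice4_iff _ _ (by decide)).mp h3))]
    simp
  · rw [pyReplaceOnce_of_prefix _ _ (by simp)
      (List.isPrefixOf_iff_prefix.mpr (by simp))]
    simp

def out_put_natural (string : String) : String :=
  String.ofList (aLoopA string.toList)

-- ===== PORT B =====
def out_put_natural_alt (string : String) : String :=
  PySem.Str.replace (PySem.Str.replace (PySem.Str.replace string "True" "TRUE")
    "False" "FALSE") "None" "NULL"

-- ===== PRECONDITION & SPEC =====
def Spec_out_put_natural (string : String) (out : String) : Prop := out = out_put_natural_alt string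
instance (string : String) (out : String) : Decidable (Spec_out_put_natural string out) := by unfold Spec_out_put_natural; infer_instance

-- ===== CLAIM (what is proved, stated in full; the proofs are below) =====
def Claim_equal_out_put_natural : Prop := ∀ (string : String), Dom_out_put_natural string → Spec_out_put_natural string (out_put_natural string)

-- ===== LEMMAS AND PROOFS =====

-- replace-all (`str.replace` with nonempty pattern) as a plain structural recursion
def repAll (old new : List Char) : List Char → List Char
  | [] => []
  | c :: t =>
    if old.isPrefixOf (c :: t) then new ++ repAll old new (t.drop (old.length - 1))
    else c :: repAll old new t
  termination_by l => l.length
  decreasing_by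
  · simp
  · simp

theorem repAll_nil (old new : List Char) : repAll old new [] = [] := by
  rw [repAll]

theorem repAll_pos (old new : List Char) (c : Char) (t : List Char)
    (h : old.isPrefixOf (c :: t) = true) :
    repAll old new (c :: t) = new ++ repAll old new (t.drop (old.length - 1)) := by
  rw [repAll]; simp [h]

theorem repAll_neg (old new : List Char) (c : Char) (t : List Char)
    (h : old.isPrefixOf (c :: t) = false) :
    repAll old new (c :: t) = c :: repAll old new t := by
  rw [repAll]; simp [h]

theorem go_eq_repAll (old new : List Char) (a : Char) (o : List Char) (ho : old = a :: o) :
    ∀ (fuel : Nat) (l acc : List Char), l.length ≤ fuel →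
      PySem.Chars.replace.go old new fuel l acc = acc.reverse ++ repAll old new l := by
  intro fuel
  induction fuel with
  | zero =>
    intro l acc hl
    have hnil : l = [] := by cases l <;> simp_all
    subst hnil
    rw [PySem.Chars.replace.go.eq_def, repAll_nil]
  | succ n ih =>
    intro l acc hl
    cases l with
    | nil => rw [PySem.Chars.replace.go.eq_def]; simp [repAll_nil]
    | cons c t =>
      have hl' : t.length ≤ n := by simpa using hl
      rw [PySem.Chars.replace.go.eq_def]
      cases hpre : old.isPrefixOf (c :: t) with
      | true =>
        simp only [hpre, if_true]
        have hdrop : List.drop old.length (c :: t) = t.drop (old.length - 1) := by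
          subst ho; simp
        have hlen : (t.drop (old.length - 1)).length ≤ n := by simp; omega
        rw [hdrop, ih (t.drop (old.length - 1)) (new.reverse ++ acc) hlen]
        rw [repAll_pos _ _ _ _ hpre]
        simp
      | false =>
        simp only [hpre]
        rw [ih t (c :: acc) hl']
        rw [repAll_neg _ _ _ _ hpre]
        simp

theorem replace_eq_repAll (s old new : List Char) (a : Char) (o : List Char)
    (ho : old = a :: o) :
    PySem.Chars.replace s old new = repAll old new s := by
  rw [PySem.Chars.replace.eq_def]
  have he : old.isEmpty = false := by subst ho; rfl
  rw [he]
  simpa using go_eq_repAll old new a o ho s.length s [] (le_refl _)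

-- replace-all passes over a block of characters none of which starts the pattern
theorem repAll_peel (a : Char) (o new : List Char) (p : List Char)
    (hp : ∀ c ∈ p, c ≠ a) :
    ∀ l, repAll (a :: o) new (p ++ l) = p ++ repAll (a :: o) new l := by
  induction p with
  | nil => intro l; simp
  | cons c p ih =>
    intro l
    have hc : c ≠ a := hp c (by simp)
    have hpre : (a :: o).isPrefixOf (c :: (p ++ l)) = false := by
      simp [List.isPrefixOf]
      intro h; exact absurd h.symm hc
    rw [List.cons_append, repAll_neg _ _ _ _ hpre, ih (fun d hd => hp d (by simp [hd])),
      List.cons_append]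

-- replace-all neither creates nor destroys a prefix avoiding the pattern's first letter
theorem repAll_prefix_iff (a : Char) (o new : List Char) :
    ∀ (w : List Char), a ∉ w → ∀ l,
      (w <+: repAll (a :: o) (a :: new) l ↔ w <+: l) := by
  intro w
  induction w with
  | nil => intro _ l; simp
  | cons b w ih =>
    intro hb l
    have hba : b ≠ a := fun h => hb (by simp [h.symm])
    have hbw : a ∉ w := fun h => hb (by simp [h])
    cases l with
    | nil => rw [repAll_nil]
    | cons c t =>
      cases hpre : (a :: o).isPrefixOf (c :: t) with
      | true =>
        have hca : c = a :=
          (List.cons_prefix_cons.mp (List.isPrefixOf_iff_prefix.mp hpre)).1.symm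
        rw [repAll_pos _ _ _ _ hpre]
        constructor
        · intro h
          exact absurd (List.cons_prefix_cons.mp h).1 hba
        · intro h
          exact absurd ((List.cons_prefix_cons.mp h).1.trans hca) hba
      | false =>
        rw [repAll_neg _ _ _ _ hpre]
        rw [List.cons_prefix_cons, List.cons_prefix_cons, ih hbw t]

-- String-literal tokens as plain character lists
theorem lTrue : "True".toList = ['T','r','u','e'] := by decide
theorem lTRUE : "TRUE".toList = ['T','R','U','E'] := by decide
theorem lFalse : "False".toList = ['F','a','l','s','e'] := by decide
theorem lFALSE : "FALSE".toList = ['F','A','L','S','E'] := by decide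
theorem lNone : "None".toList = ['N','o','n','e'] := by decide
theorem lNULL : "NULL".toList = ['N','U','L','L'] := by decide

-- the composed replace-alls, named for brevity
def rT (l : List Char) : List Char := repAll ['T','r','u','e'] ['T','R','U','E'] l
def rF (l : List Char) : List Char := repAll ['F','a','l','s','e'] ['F','A','L','S','E'] l
def rN (l : List Char) : List Char := repAll ['N','o','n','e'] ['N','U','L','L'] l

theorem aLoopA_eq_reps : ∀ (n : Nat) (l : List Char), l.length ≤ n →
    aLoopA l = rN (rF (rT l)) := by
  intro n
  induction n with
  | zero =>
    intro l hl
    have hnil : l = [] := by cases l <;> simp_all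
    subst hnil
    rw [aLoopA]; simp [rT, rF, rN, repAll_nil]
  | succ n ih =>
    intro l hl
    cases l with
    | nil => rw [aLoopA]; simp [rT, rF, rN, repAll_nil]
    | cons c t =>
      have hl' : t.length ≤ n := by simpa using hl
      rw [aLoopA]
      by_cases h1 : PySem.Chars.slice (c :: t) (some 0) (some 4) = "True".toList
      · rw [dif_pos h1, lTrue, lTRUE]
        rw [lTrue] at h1
        have hpfx : ['T','r','u','e'] <+: (c :: t) := (slice4_iff _ _ (by decide)).mp h1
        have hp : (['T','r','u','e'] : List Char).isPrefixOf (c :: t) = true :=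
          List.isPrefixOf_iff_prefix.mpr hpfx
        rw [pyReplaceOnce_of_prefix _ _ (by decide) hp]
        have hdrop : List.drop (['T','r','u','e'] : List Char).length (c :: t) = t.drop 3 := by
          simp
        have hlen : (t.drop 3).length ≤ n := by simp; omega
        rw [hdrop, ih _ hlen]
        have hT : rT (c :: t) = ['T','R','U','E'] ++ rT (t.drop 3) := by
          unfold rT; rw [repAll_pos _ _ _ _ hp]; norm_num
        have hF : rF (['T','R','U','E'] ++ rT (t.drop 3)) =
            ['T','R','U','E'] ++ rF (rT (t.drop 3)) := by
          unfold rF; exact repAll_peel 'F' _ _ _ (by simp) _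
        have hN : rN (['T','R','U','E'] ++ rF (rT (t.drop 3))) =
            ['T','R','U','E'] ++ rN (rF (rT (t.drop 3))) := by
          unfold rN; exact repAll_peel 'N' _ _ _ (by simp) _
        rw [hT, hF, hN]
      · rw [dif_neg h1]
        by_cases h2 : PySem.Chars.slice (c :: t) (some 0) (some 5) = "False".toList
        · rw [dif_pos h2, lFalse, lFALSE]
          rw [lFalse] at h2
          have hpfx : ['F','a','l','s','e'] <+: (c :: t) := (slice5_iff _ _ (by decide)).mp h2
          have hp : (['F','a','l','s','e'] : List Char).isPrefixOf (c :: t) = true :=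
            List.isPrefixOf_iff_prefix.mpr hpfx
          rw [pyReplaceOnce_of_prefix _ _ (by decide) hp]
          have hdrop : List.drop (['F','a','l','s','e'] : List Char).length (c :: t) = t.drop 4 := by
            simp
          have hlen : (t.drop 4).length ≤ n := by simp; omega
          rw [hdrop, ih _ hlen]
          have hsplit : (c :: t) = ['F','a','l','s','e'] ++ t.drop 4 := by
            obtain ⟨hc, ht⟩ := List.cons_prefix_cons.mp hpfx
            subst hc
            have ht' : (['a','l','s','e'] : List Char) = t.take 4 := by
              have := List.prefix_iff_eq_take.mp ht
              simpa using this
            calc 'F' :: t = 'F' :: (t.take 4 ++ t.drop 4) := by rw [List.take_append_drop]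
              _ = ['F','a','l','s','e'] ++ t.drop 4 := by rw [← ht']; rfl
          have hT : rT (c :: t) = ['F','a','l','s','e'] ++ rT (t.drop 4) := by
            rw [hsplit]; unfold rT
            exact repAll_peel 'T' _ _ _ (by simp) _
          have hF : rF (['F','a','l','s','e'] ++ rT (t.drop 4)) =
              ['F','A','L','S','E'] ++ rF (rT (t.drop 4)) := by
            unfold rF
            rw [show ((['F','a','l','s','e'] : List Char) ++ rT (t.drop 4)) =
              'F' :: (['a','l','s','e'] ++ rT (t.drop 4)) from rfl]
            rw [repAll_pos _ _ _ _ (by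
              rw [List.isPrefixOf_iff_prefix]
              exact ⟨rT (t.drop 4), rfl⟩)]
            norm_num
          have hN : rN (['F','A','L','S','E'] ++ rF (rT (t.drop 4))) =
              ['F','A','L','S','E'] ++ rN (rF (rT (t.drop 4))) := by
            unfold rN; exact repAll_peel 'N' _ _ _ (by simp) _
          rw [hT, hF, hN]
        · rw [dif_neg h2]
          by_cases h3 : PySem.Chars.slice (c :: t) (some 0) (some 4) = "None".toList
          · rw [dif_pos h3, lNone, lNULL]
            rw [lNone] at h3
            have hpfx : ['N','o','n','e'] <+: (c :: t) := (slice4_iff _ _ (by decide)).mp h3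
            have hp : (['N','o','n','e'] : List Char).isPrefixOf (c :: t) = true :=
              List.isPrefixOf_iff_prefix.mpr hpfx
            rw [pyReplaceOnce_of_prefix _ _ (by decide) hp]
            have hdrop : List.drop (['N','o','n','e'] : List Char).length (c :: t) = t.drop 3 := by
              simp
            have hlen : (t.drop 3).length ≤ n := by simp; omega
            rw [hdrop, ih _ hlen]
            have hsplit : (c :: t) = ['N','o','n','e'] ++ t.drop 3 := by
              obtain ⟨hc, ht⟩ := List.cons_prefix_cons.mp hpfx
              subst hc
              have ht' : (['o','n','e'] : List Char) = t.take 3 := by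
                have := List.prefix_iff_eq_take.mp ht
                simpa using this
              calc 'N' :: t = 'N' :: (t.take 3 ++ t.drop 3) := by rw [List.take_append_drop]
                _ = ['N','o','n','e'] ++ t.drop 3 := by rw [← ht']; rfl
            have hT : rT (c :: t) = ['N','o','n','e'] ++ rT (t.drop 3) := by
              rw [hsplit]; unfold rT
              exact repAll_peel 'T' _ _ _ (by simp) _
            have hF : rF (['N','o','n','e'] ++ rT (t.drop 3)) =
                ['N','o','n','e'] ++ rF (rT (t.drop 3)) := by
              unfold rF; exact repAll_peel 'F' _ _ _ (by simp) _
            have hN : rN (['N','o','n','e'] ++ rF (rT (t.drop 3))) =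
                ['N','U','L','L'] ++ rN (rF (rT (t.drop 3))) := by
              unfold rN
              rw [show ((['N','o','n','e'] : List Char) ++ rF (rT (t.drop 3))) =
                'N' :: (['o','n','e'] ++ rF (rT (t.drop 3))) from rfl]
              rw [repAll_pos _ _ _ _ (by
                rw [List.isPrefixOf_iff_prefix]
                exact ⟨rF (rT (t.drop 3)), rfl⟩)]
              norm_num
            rw [hT, hF, hN]
          · rw [dif_neg h3]
            rw [lTrue] at h1; rw [lFalse] at h2; rw [lNone] at h3
            have hnp1 : ¬ ((['T','r','u','e'] : List Char) <+: (c :: t)) :=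
              fun hpf => h1 ((slice4_iff _ _ (by decide)).mpr hpf)
            have hnp2 : ¬ ((['F','a','l','s','e'] : List Char) <+: (c :: t)) :=
              fun hpf => h2 ((slice5_iff _ _ (by decide)).mpr hpf)
            have hnp3 : ¬ ((['N','o','n','e'] : List Char) <+: (c :: t)) :=
              fun hpf => h3 ((slice4_iff _ _ (by decide)).mpr hpf)
            have hp1 : (['T','r','u','e'] : List Char).isPrefixOf (c :: t) = false := by
              cases hpre : (['T','r','u','e'] : List Char).isPrefixOf (c :: t) with
              | false => rfl
              | true => exact absurd (List.isPrefixOf_iff_prefix.mp hpre) hnp1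
            have hpc : ([c]).isPrefixOf (c :: t) = true := by simp [List.isPrefixOf]
            rw [pyReplaceOnce_of_prefix _ _ (by simp) hpc]
            simp only [List.length_cons, List.length_nil, List.drop_succ_cons, List.drop_zero]
            rw [ih t hl']
            -- push the three replace-alls through the untouched head character
            have hT : rT (c :: t) = c :: rT t := by
              unfold rT; exact repAll_neg _ _ _ _ hp1
            have hF : rF (c :: rT t) = c :: rF (rT t) := by
              unfold rF
              apply repAll_neg
              cases hpre : (['F','a','l','s','e'] : List Char).isPrefixOf (c :: rT t) with
              | false => rfl
              | true =>
                exfalso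
                obtain ⟨hcF, htail⟩ := List.cons_prefix_cons.mp (List.isPrefixOf_iff_prefix.mp hpre)
                have htl : (['a','l','s','e'] : List Char) <+: t :=
                  (repAll_prefix_iff 'T' ['r','u','e'] ['R','U','E'] ['a','l','s','e'] (by simp) t).mp htail
                exact hnp2 (List.cons_prefix_cons.mpr ⟨hcF, htl⟩)
            have hN : rN (c :: rF (rT t)) = c :: rN (rF (rT t)) := by
              unfold rN
              apply repAll_neg
              cases hpre : (['N','o','n','e'] : List Char).isPrefixOf (c :: rF (rT t)) with
              | false => rfl
              | true =>
                exfalso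
                obtain ⟨hcN, htail⟩ := List.cons_prefix_cons.mp (List.isPrefixOf_iff_prefix.mp hpre)
                have h1' : (['o','n','e'] : List Char) <+: rT t :=
                  (repAll_prefix_iff 'F' ['a','l','s','e'] ['A','L','S','E'] ['o','n','e'] (by simp) (rT t)).mp htail
                have h2' : (['o','n','e'] : List Char) <+: t :=
                  (repAll_prefix_iff 'T' ['r','u','e'] ['R','U','E'] ['o','n','e'] (by simp) t).mp h1'
                exact hnp3 (List.cons_prefix_cons.mpr ⟨hcN, h2'⟩)
            rw [hT, hF, hN]

theorem alt_toList (s : String) :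
    (out_put_natural_alt s).toList = rN (rF (rT s.toList)) := by
  unfold out_put_natural_alt
  rw [PySem.Str.toList_replace, PySem.Str.toList_replace, PySem.Str.toList_replace]
  rw [lTrue, lTRUE, lFalse, lFALSE, lNone, lNULL]
  rw [replace_eq_repAll _ _ _ 'T' ['r','u','e'] rfl]
  rw [replace_eq_repAll _ _ _ 'F' ['a','l','s','e'] rfl]
  rw [replace_eq_repAll _ _ _ 'N' ['o','n','e'] rfl]
  rfl

-- ===== VERDICT (by name: the statement is the Claim_ definition above) =====
theorem out_put_natural_spec : Claim_equal_out_put_natural := by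
  intro s _
  unfold Spec_out_put_natural
  apply String.toList_inj.mp
  rw [alt_toList]
  unfold out_put_natural
  rw [String.toList_ofList]
  exact aLoopA_eq_reps s.toList.length s.toList (le_refl _)
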